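-- pv_equiv track=rewrite | github.com/gulidamarta/bioinformatics-1 | b1-03-align-linear-gap-gulidamarta/exercise_sheet3.py | nw_init
-- ===== SOURCE A (Python) =====
-- from typing import Dict, List, Tuple
--
-- def zero_init(seq1, seq2):
--     """
--     Exercise 4 a
--     Implement the function zero_init() which takes two sequences S1 and S2 and
--     creates the Needleman-Wunsch matrix and initiates all the matrix values
--     with zeroes. Hereby S1 should be represented by the rows and S2 by
--     the columns.
--     """
--     return [[0]*(len(seq2) + 1) for _ in range(len(seq1) + 1)]
--
-- def nw_init(seq1, seq2, scoring: Dict[str, int]):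
--     """
--     Exercise 4 b
--     Implement the function nw_init() which takes two sequences S1 and S2 as
--     well as the scoring function and fills in the values for the first row and
--     first column of the matrix with the correct values. Utilize a) in your
--     implementation.
--     """
--     match, mismatch, gap = (
--         scoring["match"],
--         scoring["mismatch"],
--         scoring["gap_introduction"],
--     )
--     matrix = zero_init(seq1, seq2)
--     for i in range(len(matrix)):
--         for j in range(len(matrix[i])):
--             if i == 0:
--                 matrix[i][j] = j * gap
--
--             if j == 0:
--                 matrix[i][j] = i * gap
--
--     return matrix
-- ===== SOURCE B (Python) =====
-- def nw_init(seq1, seq2, scoring):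
--     """Fill first row/column of the NW matrix with gap penalties.
--
--     Builds the matrix directly: the first row is the gap-penalty ramp, every
--     later row starts with its gap penalty followed by zeros.  No nested scan
--     over all cells, no in-place mutation.
--     """
--     _match, _mismatch, gap = scoring["match"], scoring["mismatch"], scoring["gap_introduction"]
--     first_row = [j * gap for j in range(len(seq2) + 1)]
--     rest = [[i * gap] + [0] * len(seq2) for i in range(1, len(seq1) + 1)]
--     return [first_row] + rest
-- ===== Notes on version B (the rewrite author's own statement) =====
-- stated objective: simpler
-- what changed: B builds the bordered matrix directly (first row as a gap ramp, each later row as gap-value-then-zeros) instead of allocating a zero matrix and mutating it cell by cell in a nested double loop with branch tests.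
import Mathlib
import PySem

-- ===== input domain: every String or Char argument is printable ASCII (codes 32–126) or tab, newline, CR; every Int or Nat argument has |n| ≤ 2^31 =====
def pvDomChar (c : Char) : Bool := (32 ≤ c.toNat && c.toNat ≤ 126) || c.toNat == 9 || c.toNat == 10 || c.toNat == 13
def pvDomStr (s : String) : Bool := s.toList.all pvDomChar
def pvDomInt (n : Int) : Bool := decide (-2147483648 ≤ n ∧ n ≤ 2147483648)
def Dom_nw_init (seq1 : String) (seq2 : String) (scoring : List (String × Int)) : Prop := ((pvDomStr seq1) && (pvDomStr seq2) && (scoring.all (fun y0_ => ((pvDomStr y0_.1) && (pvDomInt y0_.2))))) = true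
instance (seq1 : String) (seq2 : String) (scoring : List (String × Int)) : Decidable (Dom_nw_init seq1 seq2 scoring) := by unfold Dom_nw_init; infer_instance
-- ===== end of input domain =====

-- B builds the bordered matrix directly (gap ramp row, then gap-then-zeros rows) instead of
-- mutating a zero matrix cell by cell in a nested double loop; same cost, simpler.

-- ===== PORT A =====
-- zero_init: [[0]*(len(seq2)+1) for _ in range(len(seq1)+1)]
def nw_zero_init (seq1 : String) (seq2 : String) : List (List Int) :=
  (PySem.List.pyRange 0 (PySem.Str.len seq1 + 1)).map
    (fun _ => List.replicate (PySem.Str.len seq2 + 1).toNat (0 : Int))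

-- A's nested loop body, mutating matrix[i][j]; indices come from range() so they are
-- nonnegative and in range, and matrix[i][j] = v is ported as List.set at those indices.
def nwStepA (gap : Int) (i : Int) (mat : List (List Int)) (j : Int) : List (List Int) :=
  let mat := if i == 0 then mat.set i.toNat ((PySem.List.pyGetD mat i []).set j.toNat (j * gap)) else mat
  if j == 0 then mat.set i.toNat ((PySem.List.pyGetD mat i []).set j.toNat (i * gap)) else mat

def nw_init (seq1 : String) (seq2 : String) (scoring : List (String × Int)) : List (List Int) :=
  -- scoring["match"], scoring["mismatch"], scoring["gap_introduction"]: KeyError (→ none) is excluded by Pre_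
  match scoring.lookup "match", scoring.lookup "mismatch", scoring.lookup "gap_introduction" with
  | some _, some _, some gap =>
      let matrix := nw_zero_init seq1 seq2
      (PySem.List.pyRange 0 (matrix.length : Int)).foldl
        (fun mat i =>
          (PySem.List.pyRange 0 ((PySem.List.pyGetD mat i []).length : Int)).foldl
            (nwStepA gap i) mat)
        matrix
  | _, _, _ => []

-- ===== PORT B =====
def nw_init_alt (seq1 : String) (seq2 : String) (scoring : List (String × Int)) : List (List Int) :=
  -- the three subscript lookups, in Python's order; KeyError (→ none) is excluded by Pre_
  if (scoring.lookup "match").isNone ∨ (scoring.lookup "mismatch").isNone then [] else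
  match scoring.lookup "gap_introduction" with
  | some gap =>
      -- first_row = [j * gap for j in range(len(seq2) + 1)]
      ((PySem.List.pyRange 0 (PySem.Str.len seq2 + 1)).map (fun j => j * gap)) ::
      -- rest = [[i * gap] + [0] * len(seq2) for i in range(1, len(seq1) + 1)]
      (PySem.List.pyRange 1 (PySem.Str.len seq1 + 1)).map
        (fun i => i * gap :: List.replicate (PySem.Str.len seq2).toNat (0 : Int))
  | none => []

-- ===== PRECONDITION & SPEC =====
-- Pre_ excludes exactly the inputs on which Python A raises KeyError: scoring must
-- contain all three keys A reads ("match", "mismatch", "gap_introduction").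
def Pre_nw_init (_seq1 : String) (_seq2 : String) (scoring : List (String × Int)) : Prop :=
  (scoring.lookup "match").isSome = true ∧ (scoring.lookup "mismatch").isSome = true ∧
    (scoring.lookup "gap_introduction").isSome = true
instance (seq1 : String) (seq2 : String) (scoring : List (String × Int)) : Decidable (Pre_nw_init seq1 seq2 scoring) := by unfold Pre_nw_init; infer_instance

def pvWitness_nw_init : String × String × (List (String × Int)) :=
  ("AC", "G", [("match", 1), ("mismatch", -1), ("gap_introduction", -2)])


def Spec_nw_init (seq1 : String) (seq2 : String) (scoring : List (String × Int)) (out : List (List Int)) : Prop := out = nw_init_alt seq1 seq2 scoring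
instance (seq1 : String) (seq2 : String) (scoring : List (String × Int)) (out : List (List Int)) : Decidable (Spec_nw_init seq1 seq2 scoring out) := by unfold Spec_nw_init; infer_instance

-- ===== CLAIM (what is proved, stated in full; the proofs are below) =====
def Claim_equal_nw_init : Prop := ∀ (seq1 : String) (seq2 : String) (scoring : List (String × Int)), Dom_nw_init seq1 seq2 scoring → Pre_nw_init seq1 seq2 scoring → Spec_nw_init seq1 seq2 scoring (nw_init seq1 seq2 scoring)


-- ===== LEMMAS AND PROOFS =====

-- A's inner-loop body at i = 0, on a matrix with an exposed head row, rewrites the head row.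
theorem nwStepA_zero (gap : Int) (r : List Int) (rest : List (List Int)) (j : Int) :
    nwStepA gap 0 (r :: rest) j = (r.set j.toNat (j * gap)) :: rest := by
  by_cases hj : j = 0
  · subst hj; simp [nwStepA, PySem.List.pyGetD, PySem.List.pyGet?, PySem.List.pyIdx?, List.set_set]
  · simp [nwStepA, hj]

-- the i = 0 inner fold only touches the head row
theorem foldl_stepA_zero_cons (gap : Int) (l : List Int) (r : List Int) (rest : List (List Int)) :
    l.foldl (nwStepA gap 0) (r :: rest)
      = (l.foldl (fun r j => r.set j.toNat (j * gap)) r) :: rest := by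
  induction l generalizing r with
  | nil => rfl
  | cons x xs ih => simp [nwStepA_zero, ih]

-- filling a zero row left to right produces the gap ramp
theorem foldl_set_range (gap : Int) (m : Nat) (r : List Int) (h : m ≤ r.length) :
    (List.range m).foldl (fun r j => r.set ((j : Int)).toNat ((j : Int) * gap)) r
      = List.map (fun j : Nat => (j : Int) * gap) (List.range m) ++ r.drop m := by
  induction m with
  | zero => simp
  | succ m ih =>
      rw [List.range_succ, List.foldl_append, List.map_append,
          ih (Nat.le_of_succ_le h), List.foldl_cons, List.foldl_nil]
      have hlt : m < r.length := h
      have hdrop : r.drop m = r[m] :: r.drop (m + 1) := List.drop_eq_getElem_cons hlt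
      have hlen : ((List.range m).map (fun j => (j : Int) * gap)).length = m := by simp
      rw [hdrop, show ((m : Int)).toNat = m by simp,
          List.set_append_right _ _ (by simp)]
      simp only [List.length_map, List.length_range, Nat.sub_self, List.set_cons_zero,
        List.map_cons, List.map_nil, List.append_assoc, List.cons_append, List.nil_append]

-- A's inner-loop body at i = t+1 is the identity for j ≠ 0
theorem nwStepA_pos_ne (gap : Int) (t : Nat) (mat : List (List Int)) (j : Int) (hj : j ≠ 0) :
    nwStepA gap ((t : Int) + 1) mat j = mat := by
  simp [nwStepA, hj, show ((t : Int) + 1) ≠ 0 by omega]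

theorem foldl_stepA_pos_id (gap : Int) (t : Nat) (l : List Int) (hl : ∀ j ∈ l, j ≠ 0)
    (mat : List (List Int)) : l.foldl (nwStepA gap ((t : Int) + 1)) mat = mat := by
  induction l generalizing mat with
  | nil => rfl
  | cons x xs ih =>
      rw [List.foldl_cons, nwStepA_pos_ne gap t mat x (hl x (by simp)), ih (fun j hj => hl j (by simp [hj]))]

-- the whole inner loop at row i = t+1 ≥ 1 sets only cell (i, 0)
theorem inner_pos (gap : Int) (t C : Nat) (mat : List (List Int))
    (hrow : PySem.List.pyGetD mat ((t : Int) + 1) [] = List.replicate (C + 1) 0) :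
    (PySem.List.pyRange 0 ((PySem.List.pyGetD mat ((t : Int) + 1) []).length : Int)).foldl
        (nwStepA gap ((t : Int) + 1)) mat
      = mat.set (t + 1) (((t : Int) + 1) * gap :: List.replicate C 0) := by
  rw [hrow]
  have hlen : ((List.replicate (C + 1) (0 : Int)).length : Int) = (C : Int) + 1 := by simp
  rw [hlen, PySem.List.pyRange_one_cons (by omega : (0 : Int) < (C : Int) + 1), List.foldl_cons]
  have hstep : nwStepA gap ((t : Int) + 1) mat 0
      = mat.set (t + 1) (((t : Int) + 1) * gap :: List.replicate C 0) := by
    simp [nwStepA, show ((t : Int) + 1) ≠ 0 by omega, hrow,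
      show ((t : Int) + 1).toNat = t + 1 by omega, List.replicate_succ]
  rw [hstep]
  exact foldl_stepA_pos_id gap t _
    (fun j hj => by have := PySem.List.mem_pyRange_one.mp hj; omega) _

-- the outer loop from row t ≥ 1 on, with t rows already final and k zero rows left
theorem outer_tail (gap : Int) (C : Nat) (k : Nat) :
    ∀ (t : Nat) (done : List (List Int)), done.length = t → 1 ≤ t →
    (PySem.List.pyRange (t : Int) ((t : Int) + (k : Int))).foldl
        (fun mat i =>
          (PySem.List.pyRange 0 ((PySem.List.pyGetD mat i []).length : Int)).foldl
            (nwStepA gap i) mat)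
        (done ++ List.replicate k (List.replicate (C + 1) 0))
      = done ++ (PySem.List.pyRange (t : Int) ((t : Int) + (k : Int))).map
          (fun i => i * gap :: List.replicate C 0) := by
  induction k with
  | zero => intro t done _ _; simp [PySem.List.pyRange]
  | succ k ih =>
      intro t done hlen ht
      obtain ⟨t', rfl⟩ : ∃ t', t = t' + 1 := ⟨t - 1, by omega⟩
      have hrange : PySem.List.pyRange ((t' + 1 : Nat) : Int) (((t' + 1 : Nat) : Int) + ((k + 1 : Nat) : Int))
          = ((t' + 1 : Nat) : Int) :: PySem.List.pyRange (((t' + 1 : Nat) : Int) + 1) (((t' + 1 : Nat) : Int) + ((k + 1 : Nat) : Int)) := by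
        exact PySem.List.pyRange_one_cons (by push_cast; omega)
      rw [hrange, List.foldl_cons, List.map_cons]
      have hget : PySem.List.pyGetD (done ++ List.replicate (k + 1) (List.replicate (C + 1) (0 : Int)))
          ((t' + 1 : Nat) : Int) [] = List.replicate (C + 1) 0 := by
        rw [show ((t' + 1 : Nat) : Int) = ((done.length : Nat) : Int) by rw [hlen],
            PySem.List.pyGetD_natCast]
        simp [List.getD]
      have hcast : ((t' + 1 : Nat) : Int) = ((t' : Int) + 1) := by push_cast; ring
      rw [hcast] at hget ⊢
      rw [inner_pos gap t' C _ hget]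
      have hsplit : List.replicate (k + 1) (List.replicate (C + 1) (0 : Int))
          = List.replicate (C + 1) (0 : Int) :: List.replicate k (List.replicate (C + 1) 0) := by
        simp [List.replicate_succ]
      have hset : (done ++ List.replicate (k + 1) (List.replicate (C + 1) (0 : Int))).set (t' + 1)
            (((t' : Int) + 1) * gap :: List.replicate C 0)
          = (done ++ [((t' : Int) + 1) * gap :: List.replicate C 0])
              ++ List.replicate k (List.replicate (C + 1) 0) := by
        rw [hsplit, show t' + 1 = done.length by omega]
        simp
      rw [hset]
      have hres := ih (t' + 2) (done ++ [((t' : Int) + 1) * gap :: List.replicate C 0])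
        (by simp [hlen]) (by omega)
      have hc2 : (((t' + 2 : Nat) : Int)) = ((t' : Int) + 1) + 1 := by push_cast; ring
      have hc3 : (((t' + 2 : Nat) : Int) + ((k : Nat) : Int)) = ((t' : Int) + 1) + ((k + 1 : Nat) : Int) := by push_cast; ring
      rw [hc3] at hres
      rw [hc2] at hres
      rw [hres]
      simp

-- the i = 0 pass turns the head zero row into the gap ramp
theorem inner_zero (gap : Int) (C : Nat) (rest : List (List Int)) :
    (PySem.List.pyRange 0 ((C : Int) + 1)).foldl (nwStepA gap 0)
        (List.replicate (C + 1) 0 :: rest)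
      = ((PySem.List.pyRange 0 ((C : Int) + 1)).map (fun j => j * gap)) :: rest := by
  rw [foldl_stepA_zero_cons]
  have h1 : ((C : Int) + 1) = ((C + 1 : Nat) : Int) := by push_cast; ring
  rw [h1, PySem.List.pyRange_zero_natCast, List.foldl_map, List.map_map]
  rw [foldl_set_range gap (C + 1) _ (by simp)]
  simp

-- the two ports agree once all three lookups succeed
theorem nw_core (gap : Int) (R C : Nat) :
    (PySem.List.pyRange 0 ((((PySem.List.pyRange 0 ((R : Int) + 1)).map
          (fun _ => List.replicate (C + 1) (0 : Int))).length : Int))).foldl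
        (fun mat i =>
          (PySem.List.pyRange 0 ((PySem.List.pyGetD mat i []).length : Int)).foldl
            (nwStepA gap i) mat)
        ((PySem.List.pyRange 0 ((R : Int) + 1)).map (fun _ => List.replicate (C + 1) (0 : Int)))
      = ((PySem.List.pyRange 0 ((C : Int) + 1)).map (fun j => j * gap)) ::
          (PySem.List.pyRange 1 ((R : Int) + 1)).map (fun i => i * gap :: List.replicate C 0) := by
  have hmat : (PySem.List.pyRange 0 ((R : Int) + 1)).map (fun _ => List.replicate (C + 1) (0 : Int))
      = List.replicate (R + 1) (List.replicate (C + 1) 0) := by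
    rw [show ((R : Int) + 1) = ((R + 1 : Nat) : Int) by push_cast; ring,
        PySem.List.pyRange_zero_natCast, List.map_map]
    simp [List.eq_replicate_iff]
  rw [hmat]
  have hlen : ((List.replicate (R + 1) (List.replicate (C + 1) (0 : Int))).length : Int)
      = (0 : Int) + ((R + 1 : Nat) : Int) := by simp
  rw [hlen, PySem.List.pyRange_one_cons (by push_cast; omega), List.foldl_cons]
  -- first iteration: i = 0
  have hget0 : PySem.List.pyGetD (List.replicate (R + 1) (List.replicate (C + 1) (0 : Int))) 0 []
      = List.replicate (C + 1) 0 := by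
    simp [PySem.List.pyGetD, PySem.List.pyGet?, PySem.List.pyIdx?, List.replicate_succ]
  rw [hget0]
  have hl : ((List.replicate (C + 1) (0 : Int)).length : Int) = (C : Int) + 1 := by simp
  rw [hl]
  rw [show List.replicate (R + 1) (List.replicate (C + 1) (0 : Int))
      = List.replicate (C + 1) (0 : Int) :: List.replicate R (List.replicate (C + 1) 0) by
    simp [List.replicate_succ]]
  rw [inner_zero gap C]
  -- remaining rows: i = 1 .. R
  have htail := outer_tail gap C R 1
    [((PySem.List.pyRange 0 ((C : Int) + 1)).map (fun j => j * gap))] (by simp) (by omega)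
  have hb : ((1 : Nat) : Int) + ((R : Nat) : Int) = (R : Int) + 1 := by push_cast; ring
  rw [show ((1 : Nat) : Int) = (1 : Int) by simp] at htail
  rw [show (1 : Int) + ((R : Nat) : Int) = (R : Int) + 1 by ring] at htail
  rw [show (0 : Int) + 1 = (1 : Int) by ring,
      show (0 : Int) + ((R + 1 : Nat) : Int) = (R : Int) + 1 by push_cast; ring]
  simpa using htail

-- ===== VERDICT (by name: the statement is the Claim_ definition above) =====
theorem nw_init_spec : Claim_equal_nw_init := by
  intro seq1 seq2 scoring _ hpre
  obtain ⟨h1, h2, h3⟩ := hpre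
  obtain ⟨m, hm⟩ := Option.isSome_iff_exists.mp h1
  obtain ⟨mm, hmm⟩ := Option.isSome_iff_exists.mp h2
  obtain ⟨gap, hg⟩ := Option.isSome_iff_exists.mp h3
  unfold Spec_nw_init nw_init nw_init_alt nw_zero_init
  rw [hm, hmm, hg]
  simp only [Option.isNone_some, Bool.false_eq_true, or_self, if_false]
  have hcore := nw_core gap seq1.toList.length seq2.toList.length
  simp only [PySem.Str.len_eq]
  rw [show ((seq2.toList.length : Int)).toNat = seq2.toList.length by simp] at *
  exact hcore
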